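-- pv_equiv track=rewrite | github.com/AndreiCIlies/Transposition_Cipher | Server.py | transposition_cipher_matrix
-- ===== SOURCE A (Python) =====
-- KEY = "KEY"
--
-- def transposition_cipher_matrix(transposition_cipher):
--     matrix = []
--     row = []
--
--     for i in range(0, len(transposition_cipher)):
--         row.append(transposition_cipher[i])
--
--         if (i + 1) % len(KEY) == 0:
--             matrix.append(row)
--             row = []
--
--     transposition_cipher = matrix
--
--     return transposition_cipher
-- ===== SOURCE B (Python) =====
-- KEY = "KEY"
--
-- def transposition_cipher_matrix(transposition_cipher):
--     n = len(KEY)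
--     end = len(transposition_cipher) - len(transposition_cipher) % n
--     return [list(transposition_cipher[i:i + n]) for i in range(0, end, n)]
-- ===== Notes on version B (the rewrite author's own statement) =====
-- stated objective: simpler
-- what changed: Replaces the per-character append loop with a running row and a modulo-triggered flush by a single slice comprehension over chunk-start indices, truncated so the incomplete trailing row is dropped exactly as A does.
import Mathlib
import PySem

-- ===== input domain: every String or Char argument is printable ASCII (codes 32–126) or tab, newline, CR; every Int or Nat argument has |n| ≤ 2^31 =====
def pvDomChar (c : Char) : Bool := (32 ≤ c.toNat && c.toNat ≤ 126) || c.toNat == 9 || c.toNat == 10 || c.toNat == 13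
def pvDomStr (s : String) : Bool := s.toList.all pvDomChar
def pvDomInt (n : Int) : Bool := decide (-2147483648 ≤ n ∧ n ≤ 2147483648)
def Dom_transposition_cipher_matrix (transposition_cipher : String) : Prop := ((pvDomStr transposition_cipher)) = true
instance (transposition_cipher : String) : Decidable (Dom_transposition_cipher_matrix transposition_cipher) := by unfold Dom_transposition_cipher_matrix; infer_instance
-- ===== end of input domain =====

-- B replaces A's per-character loop with a running row and a modulo-triggered flush by a
-- single slice comprehension over chunk-start indices (incomplete trailing chunk truncated
-- away); a simpler decomposition of the same O(n) task.


-- shared module constant KEY = "KEY"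
def pvKEY : String := "KEY"
-- Python's s[i] / iteration over a str yields one-character strings
def pvCharStr (c : Char) : String := String.ofList [c]

-- ===== PORT A =====
-- loop body: row.append(s[i]); if (i + 1) % len(KEY) == 0: matrix.append(row); row = []
def pvStepA (full : List Char) (st : List (List String) × List String) (i : Int) :
    List (List String) × List String :=
  let row := st.2 ++ [pvCharStr (PySem.List.pyGetD full i ' ')]
  if PySem.Int.mod (i + 1) (PySem.Str.len pvKEY) = 0 then (st.1 ++ [row], ([] : List String))
  else (st.1, row)

def transposition_cipher_matrix (transposition_cipher : String) : List (List String) :=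
  ((PySem.List.pyRange 0 (PySem.Str.len transposition_cipher) 1).foldl
    (pvStepA transposition_cipher.toList) ([], [])).1

-- ===== PORT B =====
def transposition_cipher_matrix_alt (transposition_cipher : String) : List (List String) :=
  let n := PySem.Str.len pvKEY
  let e := PySem.Str.len transposition_cipher -
    PySem.Int.mod (PySem.Str.len transposition_cipher) n
  (PySem.List.pyRange 0 e n).map
    (fun i => (PySem.List.slice transposition_cipher.toList (some i) (some (i + n))).map pvCharStr)

-- ===== PRECONDITION & SPEC =====
def Spec_transposition_cipher_matrix (transposition_cipher : String) (out : List (List String)) : Prop := out = transposition_cipher_matrix_alt transposition_cipher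
instance (transposition_cipher : String) (out : List (List String)) : Decidable (Spec_transposition_cipher_matrix transposition_cipher out) := by unfold Spec_transposition_cipher_matrix; infer_instance

-- ===== CLAIM (what is proved, stated in full; the proofs are below) =====
def Claim_equal_transposition_cipher_matrix : Prop := ∀ (transposition_cipher : String), Dom_transposition_cipher_matrix transposition_cipher → Spec_transposition_cipher_matrix transposition_cipher (transposition_cipher_matrix transposition_cipher)

-- ===== LEMMAS AND PROOFS =====

-- proof-side specification: the string chunked three characters at a time, remainder dropped
def pvChunk3 : List Char → List (List String)
  | a :: b :: c :: r => [pvCharStr a, pvCharStr b, pvCharStr c] :: pvChunk3 r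
  | _ => []

lemma pvKeyLen : PySem.Str.len pvKEY = 3 := by decide

lemma pvRange3_cons (a b : Int) (h : a < b) :
    PySem.List.pyRange a b 3 = a :: PySem.List.pyRange (a + 3) b 3 := by
  rw [PySem.List.pyRange_of_pos a b (by norm_num), PySem.List.pyRange_of_pos (a+3) b (by norm_num)]
  by_cases h3 : a + 3 < b
  · rw [if_pos h, if_pos h3]
    have ht : ((b - a + 3 - 1) / 3).toNat = ((b - (a+3) + 3 - 1)/3).toNat + 1 := by omega
    rw [ht, List.range_succ_eq_map]
    simp only [List.map_cons, List.map_map, Nat.cast_zero, mul_zero, add_zero, List.cons.injEq]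
    refine ⟨trivial, List.map_congr_left fun k _ => ?_⟩
    simp [Function.comp]; ring
  · rw [if_pos h, if_neg h3]
    have ht : ((b - a + 3 - 1) / 3).toNat = 1 := by omega
    rw [ht]; simp

lemma pvB_eq (cs : List Char) : ∀ (pre : List Char),
    (PySem.List.pyRange (pre.length : Int)
        ((pre.length : Int) + ((cs.length : Int) - (cs.length : Int) % 3)) 3).map
      (fun i => (PySem.List.slice (pre ++ cs) (some i) (some (i + 3))).map pvCharStr)
      = pvChunk3 cs := by
  induction cs using pvChunk3.induct with
  | case1 a b c r ih =>
    intro pre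
    have hcons : PySem.List.pyRange (pre.length : Int)
        ((pre.length : Int) + (((a::b::c::r).length : Int) - ((a::b::c::r).length : Int) % 3)) 3
        = (pre.length : Int) :: PySem.List.pyRange ((pre.length : Int) + 3)
          ((pre.length : Int) + (((a::b::c::r).length : Int) - ((a::b::c::r).length : Int) % 3)) 3 := by
      apply pvRange3_cons
      simp only [List.length_cons]
      push_cast
      omega
    rw [hcons]
    simp only [List.map_cons]
    have ih' := ih (pre ++ [a, b, c])
    rw [List.append_assoc] at ih'
    have h1 : (((pre ++ [a, b, c]).length : Nat) : Int) = (pre.length : Int) + 3 := by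
      simp
    have h2 : ((pre.length : Int) + 3) + ((r.length : Int) - (r.length : Int) % 3)
        = (pre.length : Int) + (((a::b::c::r).length : Int) - ((a::b::c::r).length : Int) % 3) := by
      simp only [List.length_cons]; push_cast; omega
    rw [h1, h2] at ih'
    simp only [List.cons_append, List.nil_append] at ih'
    rw [ih']
    have h3 : ((pre.length : Int) + 3) = ((pre.length : Int) + ((3:Nat) : Int)) := by norm_num
    rw [h3, PySem.List.slice_natCast_add, List.drop_left]
    simp [pvChunk3]
  | case2 cs h =>
    intro pre
    rcases cs with _|⟨a,_|⟨b,_|⟨c,r⟩⟩⟩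
    case cons.cons.cons => exact absurd (h a b c r rfl) not_false
    all_goals {
      norm_num
      rw [PySem.List.pyRange_of_pos _ _ (by norm_num : (0:Int) < 3)]
      simp [pvChunk3] }

lemma pvGetApp (pre cs : List Char) (k : Nat) (x : Char) (hx : cs[k]? = some x) :
    PySem.List.pyGetD (pre ++ cs) ((pre.length : Int) + (k : Int)) ' ' = x := by
  rw [show ((pre.length : Int) + (k : Int)) = ((pre.length + k : Nat) : Int) by push_cast; ring,
    PySem.List.pyGetD_natCast]
  rw [List.getD_eq_getElem?_getD, List.getElem?_append_right (Nat.le_add_right _ _)]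
  simp [hx]

lemma pvA_eq (cs : List Char) : ∀ (pre : List Char) (m : List (List String)), 3 ∣ pre.length →
    ((PySem.List.pyRange (pre.length : Int) ((pre.length : Int) + (cs.length : Int)) 1).foldl
        (pvStepA (pre ++ cs)) (m, [])).1 = m ++ pvChunk3 cs := by
  induction cs using pvChunk3.induct with
  | case1 a b c r ih =>
    intro pre m h3
    obtain ⟨t, ht⟩ := h3
    have hL : ((a::b::c::r).length : Int) = (r.length : Int) + 3 := by push_cast [List.length_cons]; ring
    rw [PySem.List.pyRange_one_cons (by omega), PySem.List.pyRange_one_cons (by omega),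
        PySem.List.pyRange_one_cons (by omega)]
    simp only [List.foldl_cons]
    have m1 : ¬ PySem.Int.mod ((pre.length : Int) + 1) (3:Int) = 0 := by
      rw [PySem.Int.mod_eq_emod_of_pos (by norm_num)]; omega
    have m2 : ¬ PySem.Int.mod ((pre.length : Int) + 1 + 1) (3:Int) = 0 := by
      rw [PySem.Int.mod_eq_emod_of_pos (by norm_num)]; omega
    have m3 : PySem.Int.mod ((pre.length : Int) + 1 + 1 + 1) (3:Int) = 0 := by
      rw [PySem.Int.mod_eq_emod_of_pos (by norm_num)]; omega
    have g0 : PySem.List.pyGetD (pre ++ a::b::c::r) ((pre.length : Int)) ' ' = a := by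
      have := pvGetApp pre (a::b::c::r) 0 a (by simp)
      rw [show ((pre.length : Int) + ((0:Nat) : Int)) = ((pre.length : Int)) by push_cast; ring] at this
      exact this
    have g1 : PySem.List.pyGetD (pre ++ a::b::c::r) ((pre.length : Int) + 1) ' ' = b := by
      simpa using pvGetApp pre (a::b::c::r) 1 b (by simp)
    have g2 : PySem.List.pyGetD (pre ++ a::b::c::r) ((pre.length : Int) + 1 + 1) ' ' = c := by
      have := pvGetApp pre (a::b::c::r) 2 c (by simp)
      rw [show ((pre.length : Int) + ((2:Nat) : Int)) = ((pre.length : Int) + 1 + 1) by push_cast; ring] at this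
      exact this
    simp only [pvStepA]
    rw [pvKeyLen]
    simp only [g0, g1, g2, m1, m2, m3, if_false, if_pos]
    have ih' := ih (pre ++ [a, b, c]) (m ++ [[pvCharStr a, pvCharStr b, pvCharStr c]])
      ⟨t + 1, by simp [ht]; omega⟩
    simp only [List.append_assoc, List.cons_append, List.nil_append] at ih' ⊢
    rw [show (((pre ++ [a,b,c]).length : Nat) : Int) = (pre.length : Int) + 1 + 1 + 1 from by
      simp; omega] at ih'
    rw [show ((pre.length : Int) + 1 + 1 + 1) + (r.length : Int) = (pre.length : Int) + ((a::b::c::r).length : Int) from by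
      simp; omega] at ih'
    rw [ih']
    simp [pvChunk3]
  | case2 cs h =>
    intro pre m h3
    obtain ⟨t, ht⟩ := h3
    have d1 : ¬ ((3:Int) ∣ ((pre.length : Int) + 1)) := by omega
    have d2 : ¬ ((3:Int) ∣ ((pre.length : Int) + 1 + 1)) := by omega
    rcases cs with _|⟨a,_|⟨b,_|⟨c,r⟩⟩⟩
    case cons.cons.cons => exact absurd (h a b c r rfl) not_false
    · rw [PySem.List.pyRange_one_eq_nil (by norm_num)]
      simp [pvChunk3]
    · rw [PySem.List.pyRange_one_cons (by norm_num), PySem.List.pyRange_one_eq_nil (by push_cast [List.length_cons, List.length_nil]; omega)]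
      simp only [List.foldl_cons, List.foldl_nil, pvStepA]
      rw [pvKeyLen]
      simp [d1, pvChunk3]
    · rw [PySem.List.pyRange_one_cons (by push_cast [List.length_cons, List.length_nil]; omega), PySem.List.pyRange_one_cons (by push_cast [List.length_cons, List.length_nil]; omega),
        PySem.List.pyRange_one_eq_nil (by push_cast [List.length_cons, List.length_nil]; omega)]
      simp only [List.foldl_cons, List.foldl_nil, pvStepA]
      rw [pvKeyLen]
      simp [d1, d2, pvChunk3]

-- ===== VERDICT (by name: the statement is the Claim_ definition above) =====
theorem transposition_cipher_matrix_spec : Claim_equal_transposition_cipher_matrix := by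
  intro s _
  unfold Spec_transposition_cipher_matrix transposition_cipher_matrix transposition_cipher_matrix_alt
  have hA := pvA_eq s.toList [] [] ⟨0, rfl⟩
  simp only [List.nil_append, List.length_nil, Nat.cast_zero, zero_add] at hA
  have hB := pvB_eq s.toList []
  simp only [List.nil_append, List.length_nil, Nat.cast_zero, zero_add] at hB
  have hk : ((pvKEY.toList.length : Nat) : Int) = 3 := by decide
  simp only [PySem.Str.len_eq, hk, PySem.Int.mod_eq_emod_of_pos (by norm_num : (0:Int) < 3)]
  rw [hA, ← hB]
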